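-- pv_equiv track=rewrite | github.com/Danial968/Codestepbystep | Collapse sequence.py | helper
-- ===== SOURCE A (Python) =====
-- def helper(word,letter,final,number):
--     if number == len(word):
--         return final
--
--     if word[number] != letter or word[number] != word[number - 1]:
--         final += word[number]
--     number += 1
--
--     result = helper(word,letter,final,number)
--     return result
-- ===== SOURCE B (Python) =====
-- def helper(word, letter, final, number):
--     for i in range(number, len(word)):
--         c = word[i]
--         if c != letter or c != word[i - 1]:
--             final += c
--     return final
-- ===== Notes on version B (the rewrite author's own statement) =====
-- stated objective: simpler
-- what changed: Replaces the tail recursion (one Python call frame per character) with a single flat for-loop over range(number, len(word)) accumulating the result string; no recursion, no re-passing of the parameters.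
import Mathlib
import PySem

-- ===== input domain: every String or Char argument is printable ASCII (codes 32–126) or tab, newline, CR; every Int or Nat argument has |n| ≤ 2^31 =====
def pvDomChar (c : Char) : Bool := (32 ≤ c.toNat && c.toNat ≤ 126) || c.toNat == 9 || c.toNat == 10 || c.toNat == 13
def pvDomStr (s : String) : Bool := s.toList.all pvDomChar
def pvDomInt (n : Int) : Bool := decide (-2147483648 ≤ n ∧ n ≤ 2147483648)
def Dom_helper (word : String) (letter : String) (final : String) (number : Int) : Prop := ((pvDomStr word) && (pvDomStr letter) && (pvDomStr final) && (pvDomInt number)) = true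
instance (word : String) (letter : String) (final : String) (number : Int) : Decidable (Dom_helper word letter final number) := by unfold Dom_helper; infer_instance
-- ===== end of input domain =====

-- B replaces A's tail recursion by a single flat for-loop over range(number, len(word)); the return value is unchanged (objective: simpler).

-- ===== PORT A =====
-- A is a tail-recursive function: ported as structural recursion on a fuel that counts
-- the remaining steps L - number (exact under Pre_, where every index access succeeds).
def helperGoA (wl ll : List Char) (final : List Char) (number : Int) (fuel : Nat) : List Char :=
  if number = (wl.length : Int) then final
  else
    match fuel with
    | 0 => final   -- unreachable under Pre_helper
    | f + 1 =>
      let c := (PySem.List.pyGet? wl number).getD ' '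
      let final' := if [c] ≠ ll ∨ c ≠ (PySem.List.pyGet? wl (number - 1)).getD ' '
                    then final ++ [c] else final
      helperGoA wl ll final' (number + 1) f

def helper (word : String) (letter : String) (final : String) (number : Int) : String :=
  String.mk (helperGoA word.toList letter.toList final.toList number
    (((word.toList.length : Int) - number).toNat))

-- ===== PORT B =====
def helper_alt (word : String) (letter : String) (final : String) (number : Int) : String :=
  String.mk ((PySem.List.pyRange number (word.toList.length : Int) 1).foldl
    (fun acc i =>
      let c := (PySem.List.pyGet? word.toList i).getD ' '
      if [c] ≠ letter.toList ∨ c ≠ (PySem.List.pyGet? word.toList (i - 1)).getD ' '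
      then acc ++ [c] else acc)
    final.toList)

-- ===== PRECONDITION & SPEC =====
-- Pre_helper = exactly the inputs on which A returns: the start index must be a valid Python
-- index (or == len) and, at number = -len with a nonempty word, word[0] must differ from
-- letter (otherwise A evaluates word[-len-1] and raises IndexError).
def Pre_helper (word : String) (letter : String) (final : String) (number : Int) : Prop :=
  -(word.toList.length : Int) ≤ number ∧ number ≤ (word.toList.length : Int) ∧
  (number = -(word.toList.length : Int) ∧ 0 < (word.toList.length : Int) →
    word.toList.take 1 ≠ letter.toList)
instance (word : String) (letter : String) (final : String) (number : Int) : Decidable (Pre_helper word letter final number) := by unfold Pre_helper; infer_instance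

def pvWitness_helper : String × String × String × Int := ("aabbcaa", "a", "", 0)

def Spec_helper (word : String) (letter : String) (final : String) (number : Int) (out : String) : Prop := out = helper_alt word letter final number
instance (word : String) (letter : String) (final : String) (number : Int) (out : String) : Decidable (Spec_helper word letter final number out) := by unfold Spec_helper; infer_instance

-- ===== CLAIM (what is proved, stated in full; the proofs are below) =====
def Claim_equal_helper : Prop := ∀ (word : String) (letter : String) (final : String) (number : Int), Dom_helper word letter final number → Pre_helper word letter final number → Spec_helper word letter final number (helper word letter final number)

-- ===== LEMMAS AND PROOFS =====

-- The fuel recursion of A's port equals B's fold over the index range, for enough fuel.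
theorem helperGoA_eq_fold (wl ll : List Char) :
    ∀ (fuel : Nat) (number : Int) (final : List Char),
      number ≤ (wl.length : Int) → ((wl.length : Int) - number).toNat ≤ fuel →
      helperGoA wl ll final number fuel =
        (PySem.List.pyRange number (wl.length : Int) 1).foldl
          (fun acc i =>
            let c := (PySem.List.pyGet? wl i).getD ' '
            if [c] ≠ ll ∨ c ≠ (PySem.List.pyGet? wl (i - 1)).getD ' '
            then acc ++ [c] else acc)
          final := by
  intro fuel
  induction fuel with
  | zero =>
    intro number final hle hf
    have hnum : number = (wl.length : Int) := by omega
    rw [helperGoA, if_pos hnum, hnum,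
      PySem.List.pyRange_one_eq_nil (by omega)]
    rfl
  | succ f ih =>
    intro number final hle hf
    by_cases h : number = (wl.length : Int)
    · rw [helperGoA, if_pos h, h, PySem.List.pyRange_one_eq_nil (by omega)]
      rfl
    · have hlt : number < (wl.length : Int) := lt_of_le_of_ne hle h
      rw [helperGoA, if_neg h, PySem.List.pyRange_one_cons hlt, List.foldl_cons]
      exact ih (number + 1) _ (by omega) (by omega)

-- ===== VERDICT (by name: the statement is the Claim_ definition above) =====
theorem helper_spec : Claim_equal_helper := by
  intro word letter final number _hdom hpre
  unfold Spec_helper helper helper_alt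
  rw [helperGoA_eq_fold word.toList letter.toList _ number final.toList hpre.2.1 le_rfl]
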